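-- pv_equiv track=rewrite | github.com/koscinskic/Navillation-Public-Release | nlp/DocUtils.py | _filter_sentences
-- ===== SOURCE A (Python) =====
-- def _filter_sentences(sentence_reference, keywords):
--
-- 	# TODO: better naming
-- 	sentence_lead = {}
-- 	keyword_lead = {}
--
-- 	for sentence in sentence_reference.keys():
-- 		for word in sentence_reference[sentence]:
-- 			if word in keywords:
-- 				if word in keyword_lead:
-- 					if sentence not in keyword_lead[word]:
-- 						keyword_lead[word].append(sentence)
-- 				else:
-- 					keyword_lead[word] = [sentence]
-- 				if sentence in sentence_lead:
-- 					if word not in sentence_lead[sentence]: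
-- 						sentence_lead[sentence].append(word)
-- 				else:
-- 					sentence_lead[sentence] = [word]
--
-- 	return sentence_lead, keyword_lead
-- ===== SOURCE B (Python) =====
-- def _filter_sentences(sentence_reference, keywords):
--     # Pass 1: per sentence, the deduped (first-occurrence order) list of matching keywords.
--     sentence_lead = {}
--     for sentence, words in sentence_reference.items():
--         ws = list(dict.fromkeys(w for w in words if w in keywords))
--         if ws:
--             sentence_lead[sentence] = ws
--     # Pass 2: derive the keyword -> sentences map from the already-deduped sentence map.
--     keyword_lead = {}
--     for sentence, ws in sentence_lead.items():
--         for w in ws: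
--             keyword_lead.setdefault(w, []).append(sentence)
--     return sentence_lead, keyword_lead
-- ===== Notes on version B (the rewrite author's own statement) =====
-- stated objective: simpler
-- what changed: Replaces A's single interleaved pass with per-word membership-dedup on both dicts by two shaped passes: first build each sentence's deduped keyword list with dict.fromkeys, then derive keyword_lead from sentence_lead with setdefault/append, removing all list-membership scans.
import Mathlib
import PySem

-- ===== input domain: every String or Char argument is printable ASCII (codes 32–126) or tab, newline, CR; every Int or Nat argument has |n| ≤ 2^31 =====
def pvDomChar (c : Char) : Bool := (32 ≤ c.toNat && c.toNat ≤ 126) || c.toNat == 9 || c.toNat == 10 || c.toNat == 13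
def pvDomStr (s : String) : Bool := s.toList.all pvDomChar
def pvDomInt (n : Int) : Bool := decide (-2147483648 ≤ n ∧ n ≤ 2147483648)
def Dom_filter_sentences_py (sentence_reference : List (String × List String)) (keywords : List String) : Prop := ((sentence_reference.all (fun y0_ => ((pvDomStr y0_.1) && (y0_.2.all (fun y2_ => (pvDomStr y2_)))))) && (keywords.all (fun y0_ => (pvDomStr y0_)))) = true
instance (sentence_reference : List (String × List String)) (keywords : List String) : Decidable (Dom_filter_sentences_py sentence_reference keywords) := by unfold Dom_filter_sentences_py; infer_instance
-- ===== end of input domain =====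

-- B replaces A's single interleaved pass (membership-dedup on both dicts per word) by two passes:
-- per-sentence dedup first, then keyword_lead derived from sentence_lead (objective: simpler).
-- Both ports first canonicalise the assoc list through PySem.Dict.ofList: the Python argument is a dict.

-- ===== PORT A =====
-- A's update of keyword_lead for one (sentence, word) hit (branch order as in A).
def klStepA (s : String) (kl : PySem.Dict String (List String)) (word : String) : PySem.Dict String (List String) :=
  if kl.contains word then
    (if (kl.getD word []).contains s then kl else kl.insert word (kl.getD word [] ++ [s]))
  else kl.insert word [s]

-- A's update of sentence_lead for one (sentence, word) hit.
def slStepA (s : String) (sl : PySem.Dict String (List String)) (word : String) : PySem.Dict String (List String) :=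
  if sl.contains s then
    (if (sl.getD s []).contains word then sl else sl.insert s (sl.getD s [] ++ [word]))
  else sl.insert s [word]

-- A's inner loop body over the words of one sentence.
def pairStepA (keywords : List String)
    (st : PySem.Dict String (List String) × PySem.Dict String (List String))
    (p : String × List String) :
    PySem.Dict String (List String) × PySem.Dict String (List String) :=
  p.2.foldl (fun st word =>
    if keywords.contains word then (slStepA p.1 st.1 word, klStepA p.1 st.2 word) else st) st

def filter_sentences_py (sentence_reference : List (String × List String)) (keywords : List String) : (List (String × List String)) × (List (String × List String)) :=
  let d := PySem.Dict.ofList sentence_reference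
  let st := d.items.foldl (pairStepA keywords) (PySem.Dict.empty, PySem.Dict.empty)
  (st.1.items, st.2.items)

-- ===== PORT B =====
-- pass 1 body: deduped keyword list of one sentence, stored only if non-empty
def slStepB (keywords : List String) (d : PySem.Dict String (List String)) (p : String × List String) : PySem.Dict String (List String) :=
  let ws := PySem.List.dedup (p.2.filter (fun w => keywords.contains w))
  if ws.isEmpty then d else d.insert p.1 ws

-- pass 2 body: keyword_lead.setdefault(w, []).append(sentence)  (= modify w [] (· ++ [sentence]))
def klStepB (d : PySem.Dict String (List String)) (q : String × List String) : PySem.Dict String (List String) :=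
  q.2.foldl (fun d w => d.modify w [] (fun l => l ++ [q.1])) d

def filter_sentences_py_alt (sentence_reference : List (String × List String)) (keywords : List String) : (List (String × List String)) × (List (String × List String)) :=
  let d := PySem.Dict.ofList sentence_reference
  let sl := d.items.foldl (slStepB keywords) PySem.Dict.empty
  let kl := sl.items.foldl klStepB PySem.Dict.empty
  (sl.items, kl.items)

-- ===== PRECONDITION & SPEC =====
def Spec_filter_sentences_py (sentence_reference : List (String × List String)) (keywords : List String) (out : (List (String × List String)) × (List (String × List String))) : Prop := out = filter_sentences_py_alt sentence_reference keywords
instance (sentence_reference : List (String × List String)) (keywords : List String) (out : (List (String × List String)) × (List (String × List String))) : Decidable (Spec_filter_sentences_py sentence_reference keywords out) := by unfold Spec_filter_sentences_py; infer_instance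

-- ===== CLAIM (what is proved, stated in full; the proofs are below) =====
def Claim_equal_filter_sentences_py : Prop := ∀ (sentence_reference : List (String × List String)) (keywords : List String), Dom_filter_sentences_py sentence_reference keywords → Spec_filter_sentences_py sentence_reference keywords (filter_sentences_py sentence_reference keywords)

-- ===== LEMMAS AND PROOFS =====

-- the words of one sentence that are new relative to `seen`, in first-occurrence order
def dedupNew : List String → List String → List String
  | [], _ => []
  | x :: xs, seen => if x ∈ seen then dedupNew xs seen else x :: dedupNew xs (seen ++ [x])

theorem update_eq_append_dedupNew (xs seen : List String) :
    PySem.Set.update seen xs = seen ++ dedupNew xs seen := by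
  induction xs generalizing seen with
  | nil => simp [PySem.Set.update_nil, dedupNew]
  | cons x xs ih =>
    rw [PySem.Set.update_cons, dedupNew]
    by_cases hx : x ∈ seen
    · have : PySem.Set.add seen x = seen := by
        simp [PySem.Set.add, hx]
      rw [this, ih, if_pos hx]
    · have : PySem.Set.add seen x = seen ++ [x] := by
        simp [PySem.Set.add, hx]
      rw [this, ih, if_neg hx]
      simp

theorem dedupNew_nil_eq_dedup (xs : List String) :
    dedupNew xs [] = PySem.List.dedup xs := by
  have h := update_eq_append_dedupNew xs []
  simpa [PySem.List.dedup, PySem.Set.ofList, PySem.Set.update, PySem.Set.empty] using h.symm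

theorem klStepA_mem (s : String) (kl : PySem.Dict String (List String)) (w : String)
    (h : ¬ s ∈ kl.getD w []) :
    klStepA s kl w = kl.modify w [] (fun l => l ++ [s]) := by
  unfold klStepA PySem.Dict.modify
  by_cases hc : kl.contains w
  · simp [hc, h]
  · simp only [Bool.not_eq_true] at hc
    rw [if_neg (by simp [hc]), PySem.Dict.getD_of_not_contains kl [] hc]
    simp


theorem klStepA_skip (s : String) (kl : PySem.Dict String (List String)) (w : String)
    (h : s ∈ kl.getD w []) : klStepA s kl w = kl := by
  unfold klStepA
  by_cases hc : kl.contains w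
  · simp [hc, h]
  · simp only [Bool.not_eq_true] at hc
    rw [PySem.Dict.getD_of_not_contains kl [] hc] at h
    simp at h


theorem slStepA_mem (s : String) (sl : PySem.Dict String (List String)) (w : String)
    (h : ¬ w ∈ sl.getD s []) :
    slStepA s sl w = sl.modify s [] (fun l => l ++ [w]) := by
  unfold slStepA PySem.Dict.modify
  by_cases hc : sl.contains s
  · simp [hc, h]
  · simp only [Bool.not_eq_true] at hc
    rw [if_neg (by simp [hc]), PySem.Dict.getD_of_not_contains sl [] hc]
    simp


theorem slStepA_skip (s : String) (sl : PySem.Dict String (List String)) (w : String)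
    (h : w ∈ sl.getD s []) : slStepA s sl w = sl := by
  unfold slStepA
  by_cases hc : sl.contains s
  · simp [hc, h]
  · simp only [Bool.not_eq_true] at hc
    rw [PySem.Dict.getD_of_not_contains sl [] hc] at h
    simp at h


-- A's inner loop, characterised by the two independent folds over the new words
theorem inner_fold (keywords : List String) (s : String) :
    ∀ (ws : List String) (sl kl : PySem.Dict String (List String)),
    (∀ w, s ∈ kl.getD w [] ↔ w ∈ sl.getD s []) →
    ws.foldl (fun st word =>
        if keywords.contains word then (slStepA s st.1 word, klStepA s st.2 word) else st) (sl, kl)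
      = ((dedupNew (ws.filter (fun w => keywords.contains w)) (sl.getD s [])).foldl
            (fun d w => d.modify s [] (fun l => l ++ [w])) sl,
         (dedupNew (ws.filter (fun w => keywords.contains w)) (sl.getD s [])).foldl
            (fun d w => d.modify w [] (fun l => l ++ [s])) kl) := by
  intro ws
  induction ws with
  | nil => intro sl kl _; simp [dedupNew]
  | cons x xs ih =>
    intro sl kl hInv
    by_cases hx : keywords.contains x
    · by_cases hseen : x ∈ sl.getD s []
      · have hkl : s ∈ kl.getD x [] := (hInv x).2 hseen
        simp only [List.foldl_cons, if_pos hx,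
          slStepA_skip s sl x hseen, klStepA_skip s kl x hkl]
        rw [ih sl kl hInv]
        have hf : List.filter (fun w => keywords.contains w) (x :: xs)
            = x :: List.filter (fun w => keywords.contains w) xs := by
          rw [List.filter_cons, if_pos hx]
        rw [hf]
        simp only [dedupNew]
        rw [if_pos hseen]
      · have hkl : ¬ s ∈ kl.getD x [] := fun h => hseen ((hInv x).1 h)
        simp only [List.foldl_cons, if_pos hx,
          slStepA_mem s sl x hseen, klStepA_mem s kl x hkl]
        have hInv' : ∀ w, s ∈ (kl.modify x [] (fun l => l ++ [s])).getD w [] ↔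
            w ∈ (sl.modify s [] (fun l => l ++ [x])).getD s [] := by
          intro w
          rw [PySem.Dict.getD_modify, PySem.Dict.getD_modify_self]
          by_cases hw : w = x
          · subst hw; simp
          · rw [if_neg hw]
            constructor
            · intro h; exact List.mem_append_left _ ((hInv w).1 h)
            · intro h
              rcases List.mem_append.1 h with h | h
              · exact (hInv w).2 h
              · simp at h; exact absurd h hw
        rw [ih _ _ hInv']
        rw [PySem.Dict.getD_modify_self]
        have hf : List.filter (fun w => keywords.contains w) (x :: xs)
            = x :: List.filter (fun w => keywords.contains w) xs := by
          rw [List.filter_cons, if_pos hx]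
        rw [hf]
        simp only [dedupNew]
        rw [if_neg hseen, List.foldl_cons, List.foldl_cons]
    · simp only [List.foldl_cons, if_neg hx]
      rw [ih sl kl hInv]
      have hf : List.filter (fun w => keywords.contains w) (x :: xs)
          = List.filter (fun w => keywords.contains w) xs := by
        rw [List.filter_cons, if_neg hx]
      rw [hf]


theorem foldl_modify_insert (s : String) :
    ∀ (l : List String) (d : PySem.Dict String (List String)) (a : List String),
    l.foldl (fun d w => d.modify s [] (fun t => t ++ [w])) (d.insert s a) = d.insert s (a ++ l) := by
  intro l
  induction l with
  | nil => intro d a; simp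
  | cons x xs ih =>
    intro d a
    have hstep : (d.insert s a).modify s [] (fun t => t ++ [x]) = d.insert s (a ++ [x]) := by
      unfold PySem.Dict.modify
      rw [PySem.Dict.getD_insert_self, PySem.Dict.insert_insert_self]
    rw [List.foldl_cons, hstep, ih]
    simp


-- the per-pair A step equals B's two step functions, for a fresh sentence key
theorem pairStepA_eq (keywords : List String) (sl kl : PySem.Dict String (List String))
    (p : String × List String) (hs : sl.contains p.1 = false)
    (hk : ∀ w, ¬ p.1 ∈ kl.getD w []) :
    pairStepA keywords (sl, kl) p =
      (slStepB keywords sl p,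
       (PySem.List.dedup (p.2.filter (fun w => keywords.contains w))).foldl
         (fun d w => d.modify w [] (fun l => l ++ [p.1])) kl) := by
  unfold pairStepA
  have hInv : ∀ w, p.1 ∈ kl.getD w [] ↔ w ∈ sl.getD p.1 [] := by
    intro w
    rw [PySem.Dict.getD_of_not_contains sl [] hs]
    simp [hk w]
  rw [inner_fold keywords p.1 p.2 sl kl hInv]
  rw [PySem.Dict.getD_of_not_contains sl [] hs, dedupNew_nil_eq_dedup]
  cases hds : PySem.List.dedup (p.2.filter (fun w => keywords.contains w)) with
  | nil => simp only [slStepB, hds, List.isEmpty_nil, if_true, List.foldl_nil]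
  | cons y ys =>
    simp only [slStepB, hds, List.isEmpty_cons, Bool.false_eq_true, if_false]
    congr 1
    have hmod : sl.modify p.1 [] (fun l => l ++ [y]) = sl.insert p.1 [y] := by
      unfold PySem.Dict.modify
      rw [PySem.Dict.getD_of_not_contains sl [] hs]
      simp
    rw [List.foldl_cons, hmod, foldl_modify_insert p.1 ys sl [y]]
    simp


theorem mem_getD_foldl_modify (s w t : String) :
    ∀ (l : List String) (d : PySem.Dict String (List String)),
    t ∈ (l.foldl (fun d w => d.modify w [] (fun x => x ++ [s])) d).getD w [] →
    t ∈ d.getD w [] ∨ t = s := by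
  intro l
  induction l with
  | nil => intro d h; exact Or.inl h
  | cons x xs ih =>
    intro d h
    rcases ih _ h with h | h
    · rw [PySem.Dict.getD_modify] at h
      by_cases hw : w = x
      · rw [if_pos hw] at h
        rcases List.mem_append.1 h with h | h
        · exact Or.inl (hw ▸ h)
        · simp at h; exact Or.inr h
      · rw [if_neg hw] at h; exact Or.inl h
    · exact Or.inr h


theorem contains_slStepB (keywords : List String) (d : PySem.Dict String (List String))
    (p : String × List String) (k : String) :
    (slStepB keywords d p).contains k = true → k = p.1 ∨ d.contains k = true := by
  intro h
  simp only [slStepB] at h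
  split at h
  · exact Or.inr h
  · rw [PySem.Dict.contains_insert] at h
    rcases Bool.or_eq_true_iff.1 h with h | h
    · exact Or.inl (by simpa using h)
    · exact Or.inr h


-- B's kl as a fold over the pairs instead of over sl.items
def klStepB' (keywords : List String) (d : PySem.Dict String (List String)) (p : String × List String) : PySem.Dict String (List String) :=
  (PySem.List.dedup (p.2.filter (fun w => keywords.contains w))).foldl
    (fun d w => d.modify w [] (fun l => l ++ [p.1])) d

theorem items_foldl_slStepB (keywords : List String) :
    ∀ (ps : List (String × List String)) (sl : PySem.Dict String (List String)),
    (∀ p ∈ ps, sl.contains p.1 = false) → (ps.map Prod.fst).Nodup →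
    (ps.foldl (slStepB keywords) sl).items =
      sl.items ++ ps.flatMap (fun p =>
        if (PySem.List.dedup (p.2.filter (fun w => keywords.contains w))).isEmpty then []
        else [(p.1, PySem.List.dedup (p.2.filter (fun w => keywords.contains w)))]) := by
  intro ps
  induction ps with
  | nil => intro sl _ _; simp
  | cons p ps ih =>
    intro sl hfresh hnd
    rw [List.foldl_cons, List.flatMap_cons]
    have hnd' : (ps.map Prod.fst).Nodup := (List.nodup_cons.1 hnd).2
    have hp1 : p.1 ∉ ps.map Prod.fst := (List.nodup_cons.1 hnd).1
    have hfresh' : ∀ q ∈ ps, (slStepB keywords sl p).contains q.1 = false := by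
      intro q hq
      by_contra hcon
      simp only [Bool.not_eq_false] at hcon
      rcases contains_slStepB keywords sl p q.1 hcon with h | h
      · exact hp1 (h ▸ List.mem_map_of_mem hq)
      · rw [hfresh q (List.mem_cons_of_mem _ hq)] at h; exact Bool.false_ne_true h
    rw [ih _ hfresh' hnd']
    simp only [slStepB]
    split
    · simp
    · rw [PySem.Dict.items_insert_of_not_contains _ _ (hfresh p (List.mem_cons_self))]
      simp


theorem foldl_items_klStepB (keywords : List String) :
    ∀ (ps : List (String × List String)) (d : PySem.Dict String (List String)),
    (ps.flatMap (fun p =>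
        if (PySem.List.dedup (p.2.filter (fun w => keywords.contains w))).isEmpty then []
        else [(p.1, PySem.List.dedup (p.2.filter (fun w => keywords.contains w)))])).foldl klStepB d
      = ps.foldl (klStepB' keywords) d := by
  intro ps
  induction ps with
  | nil => intro d; rfl
  | cons p ps ih =>
    intro d
    rw [List.flatMap_cons, List.foldl_append, List.foldl_cons, ih]
    congr 1
    split
    · next hds =>
      show d = klStepB' keywords d p
      unfold klStepB'
      rw [List.isEmpty_iff.1 hds]
      rfl
    · rfl


theorem outer_fold (keywords : List String) :
    ∀ (ps : List (String × List String)) (sl kl : PySem.Dict String (List String)),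
    (ps.map Prod.fst).Nodup →
    (∀ p ∈ ps, sl.contains p.1 = false) →
    (∀ p ∈ ps, ∀ w, ¬ p.1 ∈ kl.getD w []) →
    (∀ w t, t ∈ kl.getD w [] → sl.contains t = true) →
    ps.foldl (pairStepA keywords) (sl, kl)
      = (ps.foldl (slStepB keywords) sl, ps.foldl (klStepB' keywords) kl) := by
  intro ps
  induction ps with
  | nil => intro sl kl _ _ _ _; rfl
  | cons p ps ih =>
    intro sl kl hnd hfresh hkl hclosed
    rw [List.foldl_cons, List.foldl_cons, List.foldl_cons]
    have hs : sl.contains p.1 = false := hfresh p List.mem_cons_self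
    have hk : ∀ w, ¬ p.1 ∈ kl.getD w [] := hkl p List.mem_cons_self
    rw [pairStepA_eq keywords sl kl p hs hk]
    have hnd' : (ps.map Prod.fst).Nodup := (List.nodup_cons.1 hnd).2
    have hp1 : p.1 ∉ ps.map Prod.fst := (List.nodup_cons.1 hnd).1
    apply ih
    · exact hnd'
    · intro q hq
      by_contra hcon
      simp only [Bool.not_eq_false] at hcon
      rcases contains_slStepB keywords sl p q.1 hcon with h | h
      · exact hp1 (h ▸ List.mem_map_of_mem hq)
      · rw [hfresh q (List.mem_cons_of_mem _ hq)] at h; exact Bool.false_ne_true h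
    · intro q hq w hmem
      rcases mem_getD_foldl_modify p.1 w q.1 _ kl hmem with h | h
      · exact hkl q (List.mem_cons_of_mem _ hq) w h
      · exact hp1 (h ▸ List.mem_map_of_mem hq)
    · intro w t hmem
      simp only [slStepB]
      split
      · next hds =>
        rw [List.isEmpty_iff.1 hds] at hmem
        exact hclosed w t hmem
      · rcases mem_getD_foldl_modify p.1 w t _ kl hmem with h | h
        · rw [PySem.Dict.contains_insert, hclosed w t h, Bool.or_true]
        · subst h
          rw [PySem.Dict.contains_insert]
          simp


-- ===== VERDICT (by name: the statement is the Claim_ definition above) =====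
theorem filter_sentences_py_spec : Claim_equal_filter_sentences_py := by
  intro sr kws _
  simp only [Spec_filter_sentences_py, filter_sentences_py, filter_sentences_py_alt]
  have hnd : ((PySem.Dict.ofList sr).items.map Prod.fst).Nodup :=
    PySem.Dict.nodup_keys_ofList sr
  rw [outer_fold kws (PySem.Dict.ofList sr).items PySem.Dict.empty PySem.Dict.empty hnd
      (fun p _ => PySem.Dict.contains_empty p.1)
      (fun p _ w => by rw [PySem.Dict.getD_empty]; simp)
      (fun w t h => by rw [PySem.Dict.getD_empty] at h; simp at h)]
  rw [items_foldl_slStepB kws (PySem.Dict.ofList sr).items PySem.Dict.empty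
      (fun p _ => PySem.Dict.contains_empty p.1) hnd]
  have : (PySem.Dict.empty : PySem.Dict String (List String)).items = [] := rfl
  rw [this, List.nil_append, foldl_items_klStepB]
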